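-- pv_equiv track=rewrite | github.com/coppolapaolo/il-ripassone | src/ripassone/state.py | _lower_median_sequence
-- ===== SOURCE A (Python) =====
-- def _lower_median_sequence(grades: list[int]) -> tuple[int, ...]:
--     """Sequenza dei valori centrali (lower median) estratti uno alla volta.
--
--     Confronto lessicografico: il maggiore vince. Equivalente al "majority gauge"
--     classico ma deterministico per pareggi (no random).
--
--     Esempio: [3,4,5,5] -> sorted [3,4,5,5] -> pop idx 1 (=4), [3,5,5] -> pop idx 1 (=5)
--              -> [3,5] -> pop idx 0 (=3) -> [5] -> pop 5  =>  (4,5,3,5)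
--     """
--     g = sorted(grades)
--     seq: list[int] = []
--     while g:
--         n = len(g)
--         idx = (n - 1) // 2
--         seq.append(g.pop(idx))
--     return tuple(seq)
-- ===== SOURCE B (Python) =====
-- def _lower_median_sequence(grades):
--     # Closed form: after sorting, the pop-the-lower-median loop emits the median
--     # first, then alternates outward (left/right order decided by parity of n).
--     s = sorted(grades)
--     n = len(s)
--     if n == 0:
--         return ()
--     m = (n - 1) // 2
--     left = s[:m][::-1]
--     right = s[m + 1:]
--     a, b = (left, right) if n % 2 != 0 else (right, left)
--     out = [s[m]]
--     for i in range(max(len(a), len(b))):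
--         if i < len(a):
--             out.append(a[i])
--         if i < len(b):
--             out.append(b[i])
--     return tuple(out)
-- ===== Notes on version B (the rewrite author's own statement) =====
-- stated objective: faster
-- what changed: Replaces the quadratic loop that repeatedly pops the lower median from a shrinking list by a closed form: sort once, then emit the median followed by an alternating outward interleave of the left prefix (reversed) and the right suffix.
import Mathlib
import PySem

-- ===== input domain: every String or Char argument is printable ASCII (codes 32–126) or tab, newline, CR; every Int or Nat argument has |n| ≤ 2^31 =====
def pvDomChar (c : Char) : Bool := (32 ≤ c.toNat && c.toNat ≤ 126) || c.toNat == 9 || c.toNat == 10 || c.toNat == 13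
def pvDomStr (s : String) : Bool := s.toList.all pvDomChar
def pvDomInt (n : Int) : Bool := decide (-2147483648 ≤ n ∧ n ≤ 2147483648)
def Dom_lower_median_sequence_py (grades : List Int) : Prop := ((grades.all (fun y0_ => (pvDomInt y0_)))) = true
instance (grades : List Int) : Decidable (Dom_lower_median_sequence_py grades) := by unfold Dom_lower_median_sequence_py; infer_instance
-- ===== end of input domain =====

-- B replaces A's quadratic pop-the-lower-median loop by sort + closed-form outward interleave (O(n log n)).


-- ===== PORT A =====
-- the 'while g: … g.pop(idx)' loop, with 'seq' the accumulator
def pvPopLoop (g : List Int) (seq : List Int) : List Int :=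
  if hg : g = [] then seq
  else
    let n : Int := g.length
    let idx := PySem.Int.floordiv (n - 1) 2
    match h : PySem.List.pop? g idx with
    | none => seq  -- unreachable: idx is always in range for nonempty g
    | some (v, g') => pvPopLoop g' (seq ++ [v])
termination_by g.length
decreasing_by
  have hlen : g'.length + 1 = g.length := PySem.List.length_of_pop?_eq_some g h
  omega

def lower_median_sequence_py (grades : List Int) : List Int :=
  pvPopLoop (PySem.List.sorted grades (fun x => x) false) []

-- ===== PORT B =====
-- the 'for i in range(max(len(a), len(b))): append a[i]; append b[i]' loop of Source B
def pvInterLoop (a b : List Int) (out : List Int) : List Int :=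
  match a, b with
  | [], [] => out
  | x :: xs, [] => pvInterLoop xs [] (out ++ [x])
  | [], y :: ys => pvInterLoop [] ys (out ++ [y])
  | x :: xs, y :: ys => pvInterLoop xs ys (out ++ [x] ++ [y])

def lower_median_sequence_py_alt (grades : List Int) : List Int :=
  let s := PySem.List.sorted grades (fun x => x) false
  let n : Int := s.length
  if n = 0 then []
  else
    let m := PySem.Int.floordiv (n - 1) 2
    let left := (PySem.List.slice s none (some m)).reverse
    let right := PySem.List.slice s (some (m + 1)) none
    let ab := if PySem.Int.mod n 2 ≠ 0 then (left, right) else (right, left)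
    pvInterLoop ab.1 ab.2 [PySem.List.pyGetD s m 0]

-- ===== PRECONDITION & SPEC =====
def Spec_lower_median_sequence_py (grades : List Int) (out : List Int) : Prop := out = lower_median_sequence_py_alt grades
instance (grades : List Int) (out : List Int) : Decidable (Spec_lower_median_sequence_py grades out) := by unfold Spec_lower_median_sequence_py; infer_instance

-- ===== CLAIM (what is proved, stated in full; the proofs are below) =====
def Claim_equal_lower_median_sequence_py : Prop := ∀ (grades : List Int), Dom_lower_median_sequence_py grades → Spec_lower_median_sequence_py grades (lower_median_sequence_py grades)

-- ===== LEMMAS AND PROOFS =====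

-- the alternating outward order, one element at a time
def pvRiffle : List Int → List Int → List Int
  | [], ys => ys
  | x :: xs, ys => x :: pvRiffle ys xs
termination_by xs ys => xs.length + ys.length

lemma pvRiffle_cons (x : Int) (xs ys : List Int) :
    pvRiffle (x :: xs) ys = x :: pvRiffle ys xs := by
  simp [pvRiffle]

-- the B-side loop computes pvRiffle when the lists are balanced
lemma pvInterLoop_eq_riffle : ∀ (a b out : List Int),
    b.length ≤ a.length → a.length ≤ b.length + 1 →
    pvInterLoop a b out = out ++ pvRiffle a b := by
  intro a
  induction a with
  | nil =>
    intro b out h1 _h2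
    have hb : b = [] := List.eq_nil_of_length_eq_zero (by
      have : b.length ≤ 0 := by simpa using h1
      omega)
    subst hb
    simp [pvInterLoop, pvRiffle]
  | cons x xs ih =>
    intro b out h1 h2
    cases b with
    | nil =>
      have hxs : xs = [] := List.eq_nil_of_length_eq_zero (by
        have : xs.length + 1 ≤ 0 + 1 := by simpa using h2
        omega)
      subst hxs
      rw [pvInterLoop, pvInterLoop]
      simp [pvRiffle]
    | cons y ys =>
      have h1' : ys.length ≤ xs.length := by
        simpa using h1
      have h2' : xs.length ≤ ys.length + 1 := by
        have := h2; simp only [List.length_cons] at this; omega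
      simp only [pvInterLoop]
      rw [ih ys (out ++ [x] ++ [y]) h1' h2']
      rw [pvRiffle_cons, pvRiffle_cons]
      simp

-- one iteration of A's loop: with idx landing exactly on x
lemma pvPopLoop_step (l₁ l₂ : List Int) (x : Int) (seq : List Int)
    (h : l₁.length = (l₁.length + l₂.length) / 2) :
    pvPopLoop (l₁ ++ x :: l₂) seq = pvPopLoop (l₁ ++ l₂) (seq ++ [x]) := by
  rw [pvPopLoop.eq_def]
  have hne : ¬ (l₁ ++ x :: l₂ = []) := by simp
  simp only [hne, dite_false]
  have hlen : (l₁ ++ x :: l₂).length = l₁.length + l₂.length + 1 := by simp; omega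
  have hidx : PySem.Int.floordiv (((l₁ ++ x :: l₂).length : Int) - 1) 2
      = ((l₁.length : Int)) := by
    rw [hlen]
    have h1 : ((l₁.length + l₂.length + 1 : Nat) : Int) - 1
        = ((l₁.length + l₂.length : Nat) : Int) := by push_cast; ring
    rw [h1]
    calc PySem.Int.floordiv ((l₁.length + l₂.length : Nat) : Int) 2
        = (((l₁.length + l₂.length) / 2 : Nat) : Int) := by
          exact_mod_cast PySem.Int.floordiv_natCast (l₁.length + l₂.length) 2
      _ = (l₁.length : Int) := by exact_mod_cast h.symm
  have hlt : l₁.length < (l₁ ++ x :: l₂).length := by rw [hlen]; omega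
  have hpop : PySem.List.pop? (l₁ ++ x :: l₂) ((l₁.length : Int))
      = some ((l₁ ++ x :: l₂)[l₁.length], (l₁ ++ x :: l₂).eraseIdx l₁.length) :=
    PySem.List.pop?_natCast (l₁ ++ x :: l₂) l₁.length hlt
  have hget : (l₁ ++ x :: l₂)[l₁.length]'hlt = x := by
    rw [List.getElem_append_right (le_refl l₁.length)]
    simp
  have herase : (l₁ ++ x :: l₂).eraseIdx l₁.length = l₁ ++ l₂ := by
    rw [List.eraseIdx_append_of_length_le (le_refl l₁.length)]
    simp
  rw [hidx, hpop]
  simp only [hget, herase]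

-- the heart: A's loop on a balanced split produces the riffle
lemma pvPopLoop_riffle : ∀ (N : Nat) (l₁ l₂ seq : List Int),
    l₁.length + l₂.length ≤ N →
    (l₁.length = l₂.length → pvPopLoop (l₁ ++ l₂) seq = seq ++ pvRiffle l₁.reverse l₂) ∧
    (l₂.length = l₁.length + 1 → pvPopLoop (l₁ ++ l₂) seq = seq ++ pvRiffle l₂ l₁.reverse) := by
  intro N
  induction N with
  | zero =>
    intro l₁ l₂ seq hN
    have h1 : l₁ = [] := List.eq_nil_of_length_eq_zero (by omega)
    constructor
    · intro hlen
      have h2 : l₂ = [] := List.eq_nil_of_length_eq_zero (by omega)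
      subst h1; subst h2
      rw [pvPopLoop.eq_def]
      simp [pvRiffle]
    · intro hlen; omega
  | succ N ih =>
    intro l₁ l₂ seq hN
    constructor
    · intro hlen
      rcases List.eq_nil_or_concat l₁ with h1 | ⟨init, x, h1⟩
      · subst h1
        have h2 : l₂ = [] := List.eq_nil_of_length_eq_zero (by simp at hlen; omega)
        subst h2
        rw [pvPopLoop.eq_def]
        simp [pvRiffle]
      · subst h1
        rw [List.concat_eq_append]
        have hAssoc : (init ++ [x]) ++ l₂ = init ++ x :: l₂ := by simp
        rw [hAssoc]
        have hinit : init.length + 1 = l₂.length := by simp at hlen; omega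
        rw [pvPopLoop_step init l₂ x seq (by omega)]
        have := (ih init l₂ (seq ++ [x]) (by simp at hN; omega)).2 (by omega)
        rw [this]
        rw [List.reverse_concat]
        rw [pvRiffle_cons]
        simp
    · intro hlen
      cases l₂ with
      | nil => simp at hlen
      | cons y ys =>
        rw [pvPopLoop_step l₁ ys y seq (by simp only [List.length_cons] at hlen; omega)]
        have hN' : l₁.length + ys.length ≤ N := by
          simp only [List.length_cons] at hN hlen; omega
        have := (ih l₁ ys (seq ++ [y]) hN').1 (by simp only [List.length_cons] at hlen; omega)
        rw [this]
        rw [pvRiffle_cons]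
        simp

-- both ports compute the same riffle form; proved for ANY list s, sorted or not
lemma pvGeneral (s : List Int) :
    pvPopLoop s [] =
      (let n : Int := s.length
       if n = 0 then []
       else
         let m := PySem.Int.floordiv (n - 1) 2
         let left := (PySem.List.slice s none (some m)).reverse
         let right := PySem.List.slice s (some (m + 1)) none
         let ab := if PySem.Int.mod n 2 ≠ 0 then (left, right) else (right, left)
         pvInterLoop ab.1 ab.2 [PySem.List.pyGetD s m 0]) := by
  by_cases hnil : s = []
  · subst hnil
    rw [pvPopLoop.eq_def]
    simp
  · have hn : 0 < s.length := List.length_pos_iff.mpr hnil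
    have hcond : ¬ ((s.length : Int) = 0) := by
      simpa using by omega
    simp only [if_neg hcond]
    have hmint : PySem.Int.floordiv ((s.length : Int) - 1) 2 = (((s.length - 1) / 2 : Nat) : Int) := by
      have h1 : ((s.length : Int) - 1) = ((s.length - 1 : Nat) : Int) := by omega
      rw [h1]
      exact_mod_cast PySem.Int.floordiv_natCast (s.length - 1) 2
    set m : Nat := (s.length - 1) / 2 with hmdef
    have hm_lt : m < s.length := by omega
    have hmp1 : ((m : Int) + 1) = ((m + 1 : Nat) : Int) := by push_cast; ring
    have hpar : PySem.Int.mod ((s.length : Int)) 2 = ((s.length % 2 : Nat) : Int) := by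
      exact_mod_cast PySem.Int.mod_natCast s.length 2
    rw [hmint, hmp1, hpar, PySem.List.slice_to_natCast, PySem.List.slice_from_natCast,
        PySem.List.pyGetD_natCast, List.getD_eq_getElem s 0 hm_lt]
    -- split s on the A side
    have hsplit : s = s.take m ++ s[m] :: s.drop (m + 1) := by
      conv_lhs => rw [← List.take_append_drop m s]
      rw [List.drop_eq_getElem_cons hm_lt]
    have hlt : (s.take m).length = m := List.length_take_of_le hm_lt.le
    have hld : (s.drop (m + 1)).length = s.length - m - 1 := by simp; omega
    conv_lhs => rw [hsplit]
    rw [pvPopLoop_step (s.take m) (s.drop (m + 1)) (s[m]'hm_lt) [] (by rw [hlt, hld]; omega)]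
    rcases Nat.mod_two_eq_zero_or_one s.length with hpar2 | hpar2
    · -- even length: right side first
      have heven : s.length = 2 * m + 2 := by omega
      rw [hpar2]
      norm_num
      rw [pvInterLoop_eq_riffle (s.drop (m + 1)) ((s.take m).reverse) _
            (by rw [hld]; simp [hlt]; omega) (by rw [hld]; simp [hlt]; omega)]
      have := (pvPopLoop_riffle s.length ((s.take m)) (s.drop (m + 1)) ([] ++ [s[m]'hm_lt]) (by rw [hlt, hld]; omega)).2
        (by rw [hlt, hld]; omega)
      simpa using this
    · -- odd length: left side first
      have hodd : s.length = 2 * m + 1 := by omega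
      rw [hpar2]
      norm_num
      rw [pvInterLoop_eq_riffle ((s.take m).reverse) (s.drop (m + 1)) _
            (by rw [hld]; simp [hlt]; omega) (by rw [hld]; simp [hlt]; omega)]
      have := (pvPopLoop_riffle s.length ((s.take m)) (s.drop (m + 1)) ([] ++ [s[m]'hm_lt]) (by rw [hlt, hld]; omega)).1
        (by rw [hlt, hld]; omega)
      simpa using this

theorem pv_spec_aux (grades : List Int) :
    lower_median_sequence_py grades = lower_median_sequence_py_alt grades := by
  unfold lower_median_sequence_py lower_median_sequence_py_alt
  exact pvGeneral (PySem.List.sorted grades (fun x => x) false)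

-- ===== VERDICT (by name: the statement is the Claim_ definition above) =====
theorem lower_median_sequence_py_spec : Claim_equal_lower_median_sequence_py := by
  intro grades _hdom
  unfold Spec_lower_median_sequence_py
  exact pv_spec_aux grades
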